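-- pv_equiv track=rewrite | github.com/PeterR96/EMG_wristband_to-_control_virtual_hand_prosthesis | Code/PYTHON_files/HoloLens_lablled_data/EMG_FCNs.py | replace_labels
-- ===== SOURCE A (Python) =====
-- def replace_labels(label_vector, label_list):
--     final_label_vector = label_vector.copy()
--     label_idx = 0
--     prev_label = 0
--
--     for i, label in enumerate(label_vector):
--         if label == 0 and prev_label!=0:
--                 label_idx = (label_idx + 1) % len(label_list)
--         if label == 7:
--             final_label_vector[i] = label_list[label_idx]
--
--         prev_label = label
--     return final_label_vector
-- ===== SOURCE B (Python) =====
-- def replace_labels(label_vector, label_list):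
--     # pass 1: prefix count of completed non-zero segments (falling edges) per position
--     seg = []
--     c = 0
--     prev = 0
--     for v in label_vector:
--         if v == 0 and prev != 0:
--             c += 1
--         seg.append(c)
--         prev = v
--     # pass 2: rewrite only the 7-positions, cycling through label_list
--     return [label_list[s % len(label_list)] if v == 7 else v
--             for v, s in zip(label_vector, seg)]
-- ===== Notes on version B (the rewrite author's own statement) =====
-- stated objective: alternative
-- what changed: A fuses edge counting, modular index update and in-place writes into one stateful loop; B splits the task into a first pass computing a prefix count of falling edges per position and a second comprehension pass that rewrites only the 7-positions via one modulo per 7, touching nothing else.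
-- outside the precondition, e.g. on replace_labels([1, 0], []): A raises ZeroDivisionError, B returns [1, 0]
-- crash fix: When label_list is empty and label_vector has a falling edge (a 0 right after a non-zero) but no 7, A raises ZeroDivisionError while B returns the vector unchanged. — e.g. on replace_labels([1, 0], []): A raises ZeroDivisionError, B returns [1, 0]
import Mathlib
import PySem

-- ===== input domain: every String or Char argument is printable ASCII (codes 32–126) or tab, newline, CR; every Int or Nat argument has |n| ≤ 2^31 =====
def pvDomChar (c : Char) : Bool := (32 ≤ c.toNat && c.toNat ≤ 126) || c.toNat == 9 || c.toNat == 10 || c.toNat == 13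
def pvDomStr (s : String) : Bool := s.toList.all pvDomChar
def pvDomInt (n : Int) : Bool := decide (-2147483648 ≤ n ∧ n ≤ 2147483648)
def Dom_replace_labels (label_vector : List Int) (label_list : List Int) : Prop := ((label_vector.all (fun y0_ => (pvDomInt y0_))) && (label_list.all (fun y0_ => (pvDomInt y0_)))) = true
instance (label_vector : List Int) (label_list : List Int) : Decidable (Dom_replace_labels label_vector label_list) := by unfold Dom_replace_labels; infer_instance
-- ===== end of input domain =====

-- B splits A's single stateful loop into a prefix-count pass plus a rewrite pass (objective: alternative decomposition, same cost).

-- ===== PORT A =====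
-- A's loop as structural recursion over the remaining labels, carrying (final, label_idx, prev)
-- and the running index i; `ll.getD idx 0` is exact since on Pre_ the index `idx` is < ll.length
-- (Python raises only when label_list is empty, which Pre_ excludes).
def replaceLoopA (ll : List Int) : List Int → Nat → (List Int × Nat × Int) → List Int
  | [], _, st => st.1
  | v :: rest, i, (final, idx, prev) =>
      let idx' := if v = 0 ∧ prev ≠ 0 then (idx + 1) % ll.length else idx
      let final' := if v = 7 then final.set i (ll.getD idx' 0) else final
      replaceLoopA ll rest (i + 1) (final', idx', v)

def replace_labels (label_vector : List Int) (label_list : List Int) : List Int :=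
  replaceLoopA label_list label_vector 0 (label_vector, 0, 0)

-- ===== PORT B =====
-- pass 1: per-position prefix count of falling edges
def segCounts : List Int → Int → Nat → List Nat
  | [], _, _ => []
  | v :: rest, prev, c =>
      let c' := if v = 0 ∧ prev ≠ 0 then c + 1 else c
      c' :: segCounts rest v c'

-- pass 2: rewrite only the 7-positions
def replace_labels_alt (label_vector : List Int) (label_list : List Int) : List Int :=
  (label_vector.zip (segCounts label_vector 0 0)).map
    (fun p => if p.1 = 7 then label_list.getD (p.2 % label_list.length) 0 else p.1)

-- ===== PRECONDITION & SPEC =====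
-- Pre_ excludes exactly the inputs where Python A raises: an empty label_list together with a
-- falling edge (ZeroDivisionError) or a 7 (IndexError) in label_vector.
def Pre_replace_labels (label_vector : List Int) (label_list : List Int) : Prop :=
  label_list ≠ [] ∨
    (¬ (7 : Int) ∈ label_vector ∧
      ∀ p ∈ ((0 : Int) :: label_vector).zip label_vector, ¬ (p.2 = 0 ∧ p.1 ≠ 0))
instance (label_vector : List Int) (label_list : List Int) : Decidable (Pre_replace_labels label_vector label_list) := by unfold Pre_replace_labels; infer_instance

def pvWitness_replace_labels : List Int × List Int := ([7, 0, 7, 7, 0, 0, 7], [1, 2])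

-- When label_list is empty and label_vector has a falling edge but no 7, A raises
-- ZeroDivisionError while B returns the vector unchanged.
def Raises_replace_labels (label_vector : List Int) (label_list : List Int) : Prop :=
  label_list = [] ∧ ¬ (7 : Int) ∈ label_vector ∧
    ∃ p ∈ ((0 : Int) :: label_vector).zip label_vector, p.2 = 0 ∧ p.1 ≠ 0
instance (label_vector : List Int) (label_list : List Int) : Decidable (Raises_replace_labels label_vector label_list) := by unfold Raises_replace_labels; infer_instance

def pvRaiseWitness_replace_labels : List Int × List Int := ([1, 0], [])
def pvRaiseWitnessOut_replace_labels : List Int := [1, 0]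

def Spec_replace_labels (label_vector : List Int) (label_list : List Int) (out : List Int) : Prop := out = replace_labels_alt label_vector label_list
instance (label_vector : List Int) (label_list : List Int) (out : List Int) : Decidable (Spec_replace_labels label_vector label_list out) := by unfold Spec_replace_labels; infer_instance

-- ===== CLAIM (what is proved, stated in full; the proofs are below) =====
def Claim_equal_replace_labels : Prop := ∀ (label_vector : List Int) (label_list : List Int), Dom_replace_labels label_vector label_list → Pre_replace_labels label_vector label_list → Spec_replace_labels label_vector label_list (replace_labels label_vector label_list)

def Claim_raises_replace_labels : Prop := (∀ (label_vector : List Int) (label_list : List Int), Dom_replace_labels label_vector label_list → Raises_replace_labels label_vector label_list → ¬ Pre_replace_labels label_vector label_list) ∧ (Dom_replace_labels (pvRaiseWitness_replace_labels.1) (pvRaiseWitness_replace_labels.2) ∧ Raises_replace_labels (pvRaiseWitness_replace_labels.1) (pvRaiseWitness_replace_labels.2) ∧ replace_labels_alt (pvRaiseWitness_replace_labels.1) (pvRaiseWitness_replace_labels.2) = pvRaiseWitnessOut_replace_labels)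

-- ===== LEMMAS AND PROOFS =====

lemma set_append_cons (pre rest : List Int) (v x : Int) :
    (pre ++ v :: rest).set pre.length x = pre ++ x :: rest := by
  induction pre with
  | nil => rfl
  | cons a pre ih => simp [ih]

-- A's loop over the remaining labels, run on `pre ++ l` at index `pre.length` with
-- label_idx `c % n`, builds `pre` followed by B's rewrite of `l` with prefix counts from `c`.
lemma loopA_eq (ll : List Int) :
    ∀ (l pre : List Int) (c : Nat) (prev : Int),
      replaceLoopA ll l pre.length (pre ++ l, c % ll.length, prev)
        = pre ++ (l.zip (segCounts l prev c)).map
            (fun p => if p.1 = 7 then ll.getD (p.2 % ll.length) 0 else p.1) := by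
  intro l
  induction l with
  | nil => intro pre c prev; simp [replaceLoopA, segCounts]
  | cons v rest ih =>
      intro pre c prev
      have hidx : (if v = 0 ∧ prev ≠ 0 then (c % ll.length + 1) % ll.length else c % ll.length)
          = (if v = 0 ∧ prev ≠ 0 then c + 1 else c) % ll.length := by
        split <;> simp [Nat.mod_add_mod]
      set c' : Nat := if v = 0 ∧ prev ≠ 0 then c + 1 else c with hc'
      have hfin : (if v = 7 then (pre ++ v :: rest).set pre.length (ll.getD (c' % ll.length) 0)
              else pre ++ v :: rest)
          = pre ++ (if v = 7 then ll.getD (c' % ll.length) 0 else v) :: rest := by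
        split <;> simp [set_append_cons]
      have step : replaceLoopA ll (v :: rest) pre.length (pre ++ v :: rest, c % ll.length, prev)
          = replaceLoopA ll rest (pre.length + 1)
              (pre ++ (if v = 7 then ll.getD (c' % ll.length) 0 else v) :: rest,
               c' % ll.length, v) := by
        simp only [replaceLoopA, hidx, ← hc']
        rw [hfin]
      rw [step]
      have := ih (pre ++ [(if v = 7 then ll.getD (c' % ll.length) 0 else v)]) c' v
      simpa [segCounts, ← hc'] using this

-- ===== VERDICT (by name: the statement is the Claim_ definition above) =====
theorem replace_labels_spec : Claim_equal_replace_labels := by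
  intro lv ll _ _
  unfold Spec_replace_labels replace_labels replace_labels_alt
  have h := loopA_eq ll lv [] 0 0
  simpa using h

@[simp] theorem replace_labels_raises : Claim_raises_replace_labels := by
  unfold Claim_raises_replace_labels
  refine ⟨?_, by decide⟩
  rintro lv ll _ ⟨hnil, h7, p, hp, hfall⟩ hpre
  rcases hpre with h | ⟨_, hall⟩
  · exact h hnil
  · exact hall p hp hfall
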